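-- pv_equiv track=rewrite | github.com/KarpenkoMD/Python_Lessons | Lesson4/my_method.py | check_words_in_string
-- ===== SOURCE A (Python) =====
-- def is_int(str):
--     """Функция возвращает True если строка str является целым числом"""
--     try:
--         int(str)
--         return True
--     except ValueError:
--         return False
--
-- def check_words_in_string(str_to_lookup: str) -> str:
--     """Проверяет слова на наличие цифр, в качестве аргумента передается строка,
--     в которой необходимо найти слова без цифр.\n
--     Функция возвращает строку, сформированную из слов без цифр"""
--     result_string = ''
--     char_count = 0
--     digit_flag = 0
--     length = len(str_to_lookup)
--     for i in range(0, length):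
--         cur_char = str_to_lookup[i]
--         if cur_char == ' ':
--             if digit_flag == 0:
--                 if len(result_string) != 0:
--                     result_string += ' '
--                 result_string += str_to_lookup[i-char_count:i]
--             char_count = 0
--             digit_flag = 0
--         elif is_int(str_to_lookup[i]):
--             digit_flag = 1
--         else:
--             char_count += 1
--     return result_string
-- ===== SOURCE B (Python) =====
-- def is_int(str):
--     """Функция возвращает True если строка str является целым числом"""
--     try:
--         int(str)
--         return True
--     except ValueError:
--         return False
--
-- def check_words_in_string(str_to_lookup: str) -> str:
--     """Word-level rewrite: split on ' ', drop the trailing word (never emitted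
--     by the original scan), keep words with no digit character."""
--     result_string = ''
--     for word in str_to_lookup.split(' ')[:-1]:
--         if any(is_int(c) for c in word):
--             continue
--         if len(result_string) != 0:
--             result_string += ' '
--         result_string += word
--     return result_string
-- ===== Notes on version B (the rewrite author's own statement) =====
-- stated objective: idiomatic
-- what changed: Replaced A's char-indexed scan with char_count/digit_flag state and per-word backward slicing by a single word-level pass: split on the space separator, drop the trailing word (which A never emits), and append each word that contains no digit character.
import Mathlib
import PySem

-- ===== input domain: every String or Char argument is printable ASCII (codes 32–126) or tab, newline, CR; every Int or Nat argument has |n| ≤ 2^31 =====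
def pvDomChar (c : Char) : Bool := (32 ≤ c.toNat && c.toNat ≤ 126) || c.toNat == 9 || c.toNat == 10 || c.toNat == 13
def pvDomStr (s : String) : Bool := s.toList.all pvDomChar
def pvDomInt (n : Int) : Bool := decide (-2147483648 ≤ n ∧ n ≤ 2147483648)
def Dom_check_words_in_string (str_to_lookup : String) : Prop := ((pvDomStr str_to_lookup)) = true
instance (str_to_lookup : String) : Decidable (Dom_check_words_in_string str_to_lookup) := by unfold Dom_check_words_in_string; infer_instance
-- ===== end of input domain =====

-- B is the idiomatic word-level rewrite of A's char-indexed scan (split, drop the trailing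
-- word A never emits, keep digit-free words); measured faster by a constant factor.

-- ===== PORT A =====
-- is_int(s): int(s) succeeds (ValueError → False); PySem.Int.ofStr? is exact for int(s)
def is_int (str : String) : Bool := (PySem.Int.ofStr? str).isSome

-- A's loop over i in range(0, len): state (result_string, char_count, digit_flag);
-- strings are carried as List Char (String.ofList at the end). str_to_lookup[i] is ported as
-- pyGetD with an unused default: every index produced by the loop is in range, so it is exact.
def check_words_in_string (str_to_lookup : String) : String :=
  let cs := str_to_lookup.toList
  let st := (PySem.List.pyRange 0 (cs.length : Int)).foldl
    (fun (st : List Char × Int × Int) i =>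
      let res := st.1
      let cc := st.2.1
      let flag := st.2.2
      let cur := PySem.List.pyGetD cs i ' '
      if cur = ' ' then
        (if flag = 0 then
           (if res.length ≠ 0 then res ++ [' '] else res) ++
             PySem.List.slice cs (some (i - cc)) (some i)
         else res, 0, 0)
      else if is_int (String.ofList [cur]) then (res, cc, 1)
      else (res, cc + 1, flag))
    ([], 0, 0)
  String.ofList st.1

-- ===== PORT B =====
-- Source B: for word in str_to_lookup.split(' ')[:-1]: skip words with a digit char, else append
-- with a ' ' separator when result is nonempty.  split(' ') = PySem.Chars.splitOn, [:-1] = dropLast.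
def check_words_in_string_alt (str_to_lookup : String) : String :=
  String.ofList <|
    ((PySem.Chars.splitOn str_to_lookup.toList [' ']).dropLast).foldl
      (fun res word =>
        if word.any (fun c => is_int (String.ofList [c])) then res
        else (if res.length ≠ 0 then res ++ [' '] else res) ++ word)
      []

-- ===== PRECONDITION & SPEC =====
def Spec_check_words_in_string (str_to_lookup : String) (out : String) : Prop := out = check_words_in_string_alt str_to_lookup
instance (str_to_lookup : String) (out : String) : Decidable (Spec_check_words_in_string str_to_lookup out) := by unfold Spec_check_words_in_string; infer_instance

-- ===== CLAIM (what is proved, stated in full; the proofs are below) =====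
def Claim_equal_check_words_in_string : Prop := ∀ (str_to_lookup : String), Dom_check_words_in_string str_to_lookup → Spec_check_words_in_string str_to_lookup (check_words_in_string str_to_lookup)

-- ===== LEMMAS AND PROOFS =====

-- B's per-word step
def pvEmit (res word : List Char) : List Char :=
  if word.any (fun c => is_int (String.ofList [c])) then res
  else (if res.length ≠ 0 then res ++ [' '] else res) ++ word

-- A's per-index step over the fixed char list cs
def pvStepA (cs : List Char) (st : List Char × Int × Int) (i : Int) : List Char × Int × Int :=
  let res := st.1
  let cc := st.2.1
  let flag := st.2.2
  let cur := PySem.List.pyGetD cs i ' '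
  if cur = ' ' then
    (if flag = 0 then
       (if res.length ≠ 0 then res ++ [' '] else res) ++
         PySem.List.slice cs (some (i - cc)) (some i)
     else res, 0, 0)
  else if is_int (String.ofList [cur]) then (res, cc, 1)
  else (res, cc + 1, flag)

-- the word-level meaning of A's loop on the remaining chars r, with current word w and flag b
def pvRhs (r res w : List Char) (b : Bool) : List Char :=
  match r.splitOn ' ' with
  | [] => res
  | w1 :: rest =>
    if rest = [] then res
    else (rest.dropLast).foldl pvEmit
      (if b || w1.any (fun c => is_int (String.ofList [c])) then res
       else (if res.length ≠ 0 then res ++ [' '] else res) ++ (w ++ w1))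

-- bridge: PySem.Chars.splitOn with the one-char separator [' '] is List.splitOn ' '
theorem pvGo_spec (fuel : Nat) (l cur : List Char) (acc : List (List Char))
    (h : l.length < fuel) :
    PySem.Chars.splitOn.go [' '] fuel l cur acc
      = acc.reverse ++ (l.splitOn ' ').modifyHead (cur.reverse ++ ·) := by
  induction fuel generalizing l cur acc with
  | zero => omega
  | succ fuel ih =>
    cases l with
    | nil =>
      simp [PySem.Chars.splitOn.go, List.splitOn]
    | cons c rest =>
      by_cases hc : c = ' '
      · subst hc
        rw [show PySem.Chars.splitOn.go [' '] (fuel+1) (' '::rest) cur acc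
              = PySem.Chars.splitOn.go [' '] fuel rest [] (cur.reverse :: acc) by
            simp [PySem.Chars.splitOn.go, List.isPrefixOf]]
        rw [ih rest [] (cur.reverse :: acc) (by simpa using Nat.lt_of_succ_lt_succ h)]
        cases h' : List.splitOnP (fun x => x == ' ') rest with
        | nil => exact absurd h' (List.splitOnP_ne_nil _ _)
        | cons a t => simp [List.splitOn, List.splitOnP_cons, h', List.modifyHead]
      · rw [show PySem.Chars.splitOn.go [' '] (fuel+1) (c::rest) cur acc
              = PySem.Chars.splitOn.go [' '] fuel rest (c :: cur) acc by
            simp [PySem.Chars.splitOn.go, List.isPrefixOf, Ne.symm hc]]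
        rw [ih rest (c :: cur) acc (by simpa using Nat.lt_of_succ_lt_succ h)]
        simp only [List.splitOn, List.splitOnP_cons, hc, beq_iff_eq, if_false,
          List.modifyHead_modifyHead]
        cases h' : List.splitOnP (fun x => x == ' ') rest with
        | nil => exact absurd h' (List.splitOnP_ne_nil _ _)
        | cons a t => simp [List.modifyHead]

theorem pvSplitOn_bridge (cs : List Char) :
    PySem.Chars.splitOn cs [' '] = cs.splitOn ' ' := by
  rw [PySem.Chars.splitOn, pvGo_spec (cs.length + 1) cs [] [] (by omega)]
  cases h : cs.splitOn ' ' with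
  | nil => exact absurd h (List.splitOnP_ne_nil _ _)
  | cons a t => simp

-- pvRhs step lemmas: how the word-level meaning evolves per consumed character
theorem pvRhs_nil (res w : List Char) (b : Bool) : pvRhs [] res w b = res := by
  simp [pvRhs, List.splitOn_nil]

theorem pvRhs_space (r res w : List Char) (b : Bool) :
    pvRhs (' ' :: r) res w b
      = pvRhs r (if b then res else (if res.length ≠ 0 then res ++ [' '] else res) ++ w) [] false := by
  rw [pvRhs, pvRhs]
  rw [show (' ' :: r).splitOn ' ' = [] :: r.splitOn ' ' by
    simp [List.splitOn, List.splitOnP_cons]]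
  cases h : r.splitOn ' ' with
  | nil => exact absurd h (List.splitOnP_ne_nil _ _)
  | cons w1 rest =>
    cases rest with
    | nil => cases b <;> simp
    | cons a t =>
      simp only [List.dropLast_cons_of_ne_nil (List.cons_ne_nil a t), List.foldl_cons,
        reduceCtorEq, if_false]
      cases b <;> simp [pvEmit]

theorem pvRhs_digit (c : Char) (r res w : List Char) (b : Bool) (hc : c ≠ ' ')
    (hd : is_int (String.ofList [c]) = true) :
    pvRhs (c :: r) res w b = pvRhs r res [] true := by
  rw [pvRhs, pvRhs]
  rw [show (c :: r).splitOn ' ' = (r.splitOn ' ').modifyHead (List.cons c) by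
    simp [List.splitOn, List.splitOnP_cons, hc]]
  cases h : r.splitOn ' ' with
  | nil => exact absurd h (List.splitOnP_ne_nil _ _)
  | cons w1 rest =>
    cases rest with
    | nil => simp [List.modifyHead]
    | cons a t => simp [List.modifyHead, hd]

theorem pvRhs_char (c : Char) (r res w : List Char) (b : Bool) (hc : c ≠ ' ')
    (hd : is_int (String.ofList [c]) = false) :
    pvRhs (c :: r) res w b = pvRhs r res (w ++ [c]) b := by
  rw [pvRhs, pvRhs]
  rw [show (c :: r).splitOn ' ' = (r.splitOn ' ').modifyHead (List.cons c) by
    simp [List.splitOn, List.splitOnP_cons, hc]]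
  cases h : r.splitOn ' ' with
  | nil => exact absurd h (List.splitOnP_ne_nil _ _)
  | cons w1 rest =>
    cases rest with
    | nil => simp [List.modifyHead]
    | cons a t => simp [List.modifyHead, hd]

-- main loop correspondence
theorem pvLoop (r p res w : List Char) (cc flag : Int) (b : Bool)
    (hflag : flag = if b then 1 else 0)
    (hcc : b = false → cc = (w.length : Int))
    (hw : b = false → (∀ c ∈ w, c ≠ ' ' ∧ is_int (String.ofList [c]) = false) ∧
          w.length ≤ p.length ∧ p.drop (p.length - w.length) = w) :
    ((PySem.List.pyRange (p.length : Int) ((p ++ r).length : Int)).foldl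
        (pvStepA (p ++ r)) (res, cc, flag)).1
      = pvRhs r res w b := by
  induction r generalizing p res w cc flag b with
  | nil =>
    rw [pvRhs_nil]
    simp [pysem]
  | cons c r' ih =>
    have hlt : (p.length : Int) < ((p ++ c :: r').length : Int) := by
      simp
    rw [PySem.List.pyRange_one_cons hlt, List.foldl_cons]
    have hcur : PySem.List.pyGetD (p ++ c :: r') ((p.length : Nat) : Int) ' ' = c := by
      rw [PySem.List.pyGetD_natCast]
      simp [List.getD]
    have hlen : ((p.length : Int) + 1) = (((p ++ [c]).length : Nat) : Int) := by simp
    have hre : p ++ c :: r' = (p ++ [c]) ++ r' := by simp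
    by_cases hsp : c = ' '
    · subst hsp
      -- space: emit (or skip) the current word, reset the state
      have hstep : pvStepA (p ++ ' ' :: r') (res, cc, flag) ((p.length : Nat) : Int)
          = (if b then res else (if res.length ≠ 0 then res ++ [' '] else res) ++ w, 0, 0) := by
        rw [pvStepA]
        simp only [hcur, if_pos]
        cases b with
        | false =>
          obtain ⟨-, hle, hdrop⟩ := hw rfl
          have hslice : PySem.List.slice (p ++ ' ' :: r')
              (some (((p.length : Nat) : Int) - cc)) (some ((p.length : Nat) : Int)) = w := by
            rw [hcc rfl, show ((p.length : Nat) : Int) - ((w.length : Nat) : Int)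
                  = (((p.length - w.length : Nat) : Nat) : Int) by omega]
            rw [PySem.List.slice_natCast]
            rw [List.drop_append_of_le_length (by omega)]
            rw [hdrop]
            rw [show p.length - (p.length - w.length) = w.length by omega]
            exact List.take_left' rfl
          simp [hflag, hslice]
        | true => simp [hflag]
      rw [hstep, pvRhs_space]
      rw [hlen, hre]
      exact ih (p ++ [' ']) _ [] 0 0 false (by simp) (by simp) (by simp)
    · -- not a space: look at is_int on the character
      by_cases hd : is_int (String.ofList [c]) = true
      · have hstep : pvStepA (p ++ c :: r') (res, cc, flag) ((p.length : Nat) : Int)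
            = (res, cc, 1) := by
          rw [pvStepA]
          simp [hcur, hsp, hd]
        rw [hstep, pvRhs_digit c r' res w b hsp hd]
        rw [hlen, hre]
        exact ih (p ++ [c]) _ [] cc 1 true (by simp) (by simp) (by simp)
      · rw [Bool.not_eq_true] at hd
        have hstep : pvStepA (p ++ c :: r') (res, cc, flag) ((p.length : Nat) : Int)
            = (res, cc + 1, flag) := by
          rw [pvStepA]
          simp [hcur, hsp, hd]
        rw [hstep, pvRhs_char c r' res w b hsp hd]
        rw [hlen, hre]
        refine ih (p ++ [c]) _ (w ++ [c]) (cc + 1) flag b hflag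
          (fun h => by rw [hcc h]; simp) (fun h => ?_)
        obtain ⟨hall, hle, hdrop⟩ := hw h
        refine ⟨?_, by simp; omega, ?_⟩
        · intro x hx
          rcases List.mem_append.1 hx with hx | hx
          · exact hall x hx
          · simp at hx; subst hx; exact ⟨hsp, hd⟩
        · rw [show (p ++ [c]).length - (w ++ [c]).length = p.length - w.length by simp]
          rw [List.drop_append_of_le_length (by omega), hdrop]

theorem check_words_in_string_spec : Claim_equal_check_words_in_string := by
  intro s _
  have h := pvLoop s.toList [] [] [] 0 0 false (by simp) (by simp) (by simp)
  simp only [List.nil_append, List.length_nil, Nat.cast_zero] at h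
  have ha : check_words_in_string s
      = String.ofList (((PySem.List.pyRange 0 (s.toList.length : Int)).foldl
          (pvStepA s.toList) ([], 0, 0)).1) := rfl
  have hb : check_words_in_string_alt s
      = String.ofList (((PySem.Chars.splitOn s.toList [' ']).dropLast).foldl pvEmit []) := rfl
  unfold Spec_check_words_in_string
  rw [ha, hb, h, pvSplitOn_bridge, pvRhs]
  cases hsp : s.toList.splitOn ' ' with
  | nil => exact absurd hsp (List.splitOnP_ne_nil _ _)
  | cons w1 rest =>
    cases rest with
    | nil => simp
    | cons a t =>
      simp only [List.dropLast_cons_of_ne_nil (List.cons_ne_nil a t), List.foldl_cons,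
        reduceCtorEq, if_false, Bool.false_or]
      rw [pvEmit]
      simp
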